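-- pv_equiv track=rewrite | github.com/MaynotbeGarychan/PolycrystalMesh | src/pre_process/keyword_file.py | ret_form_lines
-- ===== SOURCE A (Python) =====
-- def ret_form_lines(lines, header_str:str):
--     """
--     Return a form of lists of lines, which is related to the target headers
--     :param header_str: the target str, ex. *NODES
--     :return: a form of lists of lines, without the comment lines
--     """
--     # get the beginning and end index list of one type of section
--     begin_index_list, end_index_list = _ret_begin_end_index_of_section(lines, header_str)
--     # cut the lists of lines from keyword, remove the comment lines,
--     # and return a form of lists
--     cut_lines_form = []
--     for i in range(len(begin_index_list)):
--         begin_index, end_index = begin_index_list[i], end_index_list[i]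
--         cut_lines = lines[begin_index: end_index]
--         cut_lines = _remove_comment_in_lines(cut_lines)
--         cut_lines_form.append(cut_lines)
--     # return
--     return cut_lines_form
--
-- def _ret_begin_end_index_of_section(lines, header_str:str):
--     """
--     Return two lists, begin index list and end index list of one type of section
--     which is related to the target headers
--     :param header_str: the target str, ex. *NODES
--     :return: begin index list, end index list
--     """
--     begin_index_list = []
--     end_index_list = []
--     # get the beginning index of one section
--     for i in range(len(lines)):
--         line = lines[i]
--         if line.startswith(header_str):
--             begin_index_list.append(i)
--     # get the end index correspond to the beginning index, for one section
--     for begin_index in begin_index_list: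
--         for i in range(begin_index + 1, len(lines)):
--             line = lines[i]
--             if line.startswith("*"):
--                 end_index_list.append(i)
--                 break
--             if i == (len(lines) - 1):  # go to the end line
--                 end_index_list.append(i + 1)
--     return begin_index_list, end_index_list
--
-- def _remove_comment_in_lines(lines):
--     """
--     Remove the comment line in a list of lines
--     :param lines: a list of lines for keyword
--     :return: a list of lines without the comment line
--     """
--     remove_lines = []
--     for line in lines:
--         if line.startswith('$') or line.startswith('$$') or line.startswith('$#'):
--             remove_lines.append(line)
--     for remove_line in remove_lines:
--         lines.remove(remove_line)
--     return lines
-- ===== SOURCE B (Python) =====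
-- def ret_form_lines(lines, header_str: str):
--     """Single backward pass marks, for every position, the index of the next
--     '*'-line after it; sections are then cut and comment-filtered directly."""
--     n = len(lines)
--     ns = []          # ns[i] = first index j > i with lines[j].startswith('*'), else n
--     nxt = n
--     for i in range(n - 1, -1, -1):
--         ns.append(nxt)
--         if lines[i].startswith('*'):
--             nxt = i
--     ns.reverse()
--     return [[l for l in lines[i:ns[i]] if not l.startswith('$')]
--             for i in range(n) if lines[i].startswith(header_str)]
-- ===== Notes on version B (the rewrite author's own statement) =====
-- stated objective: alternative
-- what changed: One backward pass records, for every position, the index of the next '*'-line, so each section is cut directly with no per-header forward rescan, and comments are dropped by a filter instead of collect-then-list.remove.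
-- crash fix: When lines is non-empty and its last line starts with header_str, A raises IndexError (that section never gets an end index); B returns that final section as well. — e.g. on ret_form_lines(["x", "*N"], "*N"): A raises IndexError, B returns [["*N"]]
import Mathlib
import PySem

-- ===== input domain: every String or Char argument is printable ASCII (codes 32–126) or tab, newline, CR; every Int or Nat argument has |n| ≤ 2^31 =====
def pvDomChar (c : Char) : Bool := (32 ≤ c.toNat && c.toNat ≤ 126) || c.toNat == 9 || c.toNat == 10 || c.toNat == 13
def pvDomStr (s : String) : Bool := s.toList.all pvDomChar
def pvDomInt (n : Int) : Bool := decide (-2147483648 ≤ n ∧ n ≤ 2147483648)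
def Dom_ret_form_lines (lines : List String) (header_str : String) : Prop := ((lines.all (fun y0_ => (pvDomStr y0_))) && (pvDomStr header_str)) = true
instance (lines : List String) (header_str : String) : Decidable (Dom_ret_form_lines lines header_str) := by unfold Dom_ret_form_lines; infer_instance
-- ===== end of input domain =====

-- B replaces A's per-header forward rescan and collect-then-list.remove comment removal by one
-- backward pass that records each position's next '*'-line, then a single slice-and-filter pass.

-- ===== PORT A =====
-- _remove_comment_in_lines: collect the '$'-lines, then list.remove each one.
-- remove? is none only when the value is absent; every collected value is present, so getD never defaults.
def pvRemoveComment (lines : List String) : List String :=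
  let removeLines := lines.foldl (fun acc line =>
    if PySem.Str.startswith line "$" || PySem.Str.startswith line "$$" || PySem.Str.startswith line "$#"
    then acc ++ [line] else acc) ([] : List String)
  removeLines.foldl (fun ls r => ((PySem.List.remove? ls r).getD ls)) lines

-- the inner 'for i in range(begin+1, len(lines))' loop with its two appends and the break
def pvEndScan (lines : List String) (idxs : List Int) : List Int :=
  match idxs with
  | [] => []
  | i :: rest =>
    match PySem.List.pyGet? lines i with
    | some line =>
      if PySem.Str.startswith line "*" then [i]
      else if i = (lines.length : Int) - 1 then [i + 1]
      else pvEndScan lines rest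
    | none => pvEndScan lines rest  -- unreachable: every index of range(b+1, len) is in bounds

def pvBeginEnd (lines : List String) (header_str : String) : List Int × List Int :=
  let begins := (PySem.List.pyRange 0 (lines.length : Int) 1).foldl (fun acc i =>
    match PySem.List.pyGet? lines i with
    | some line => if PySem.Str.startswith line header_str then acc ++ [i] else acc
    | none => acc) []
  let ends := begins.foldl (fun acc b =>
    acc ++ pvEndScan lines (PySem.List.pyRange (b + 1) (lines.length : Int) 1)) []
  (begins, ends)

def ret_form_lines (lines : List String) (header_str : String) : List (List String) :=
  let p := pvBeginEnd lines header_str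
  (PySem.List.pyRange 0 (p.1.length : Int) 1).foldl (fun acc i =>
    match PySem.List.pyGet? p.1 i, PySem.List.pyGet? p.2 i with
    | some b, some e => acc ++ [pvRemoveComment (PySem.List.slice lines (some b) (some e))]
    | _, _ => acc) []   -- pyGet? p.2 i = none is Python's IndexError; excluded by Pre_

-- ===== PORT B =====
-- backward pass building ns (appended back-to-front, then reversed)
def altNextStars (lines : List String) : List Int :=
  let n : Int := (lines.length : Int)
  let st := (PySem.List.pyRange (n - 1) (-1) (-1)).foldl
    (fun (st : List Int × Int) i =>
      let ns := st.1 ++ [st.2]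
      match PySem.List.pyGet? lines i with
      | none => (ns, st.2)   -- pyGet? is some on every index of range(n-1, -1, -1)
      | some line => if PySem.Str.startswith line "*" then (ns, i) else (ns, st.2)) ([], n)
  st.1.reverse

def ret_form_lines_alt (lines : List String) (header_str : String) : List (List String) :=
  let ns := altNextStars lines
  (PySem.List.pyRange 0 (lines.length : Int) 1).foldl (fun acc i =>
    match PySem.List.pyGet? lines i with
    | none => acc   -- unreachable: i ranges over range(n)
    | some line =>
      match PySem.List.pyGet? ns i with
      | none => acc   -- unreachable: ns has length n
      | some e =>
        if PySem.Str.startswith line header_str then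
          acc ++ [(PySem.List.slice lines (some i) (some e)).filter (fun l => !PySem.Str.startswith l "$")]
        else acc) []

-- ===== PRECONDITION & SPEC =====
-- Pre_ excludes exactly the inputs where A raises IndexError: a non-empty lines whose LAST line
-- starts with header_str (that section gets no end index, so end_index_list[i] is out of range).
def Pre_ret_form_lines (lines : List String) (header_str : String) : Prop :=
  lines.getLast?.all (fun l => !PySem.Str.startswith l header_str) = true
instance (lines : List String) (header_str : String) : Decidable (Pre_ret_form_lines lines header_str) := by unfold Pre_ret_form_lines; infer_instance

def pvWitness_ret_form_lines : List String × String := (["*N", "1", "$c", "*E", "x"], "*N")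

-- When the last line starts with header_str, A raises IndexError; B returns that final section too.
def Raises_ret_form_lines (lines : List String) (header_str : String) : Prop :=
  lines.getLast?.any (fun l => PySem.Str.startswith l header_str) = true
instance (lines : List String) (header_str : String) : Decidable (Raises_ret_form_lines lines header_str) := by unfold Raises_ret_form_lines; infer_instance
def pvRaiseWitness_ret_form_lines : List String × String := (["x", "*N"], "*N")
def pvRaiseWitnessOut_ret_form_lines : List (List String) := [["*N"]]

def Spec_ret_form_lines (lines : List String) (header_str : String) (out : List (List String)) : Prop := out = ret_form_lines_alt lines header_str
instance (lines : List String) (header_str : String) (out : List (List String)) : Decidable (Spec_ret_form_lines lines header_str out) := by unfold Spec_ret_form_lines; infer_instance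

-- ===== CLAIM (what is proved, stated in full; the proofs are below) =====
def Claim_equal_ret_form_lines : Prop := ∀ (lines : List String) (header_str : String), Dom_ret_form_lines lines header_str → Pre_ret_form_lines lines header_str → Spec_ret_form_lines lines header_str (ret_form_lines lines header_str)
def Claim_raises_ret_form_lines : Prop := (∀ (lines : List String) (header_str : String), Dom_ret_form_lines lines header_str → Raises_ret_form_lines lines header_str → ¬ Pre_ret_form_lines lines header_str) ∧ (Dom_ret_form_lines (pvRaiseWitness_ret_form_lines.1) (pvRaiseWitness_ret_form_lines.2) ∧ Raises_ret_form_lines (pvRaiseWitness_ret_form_lines.1) (pvRaiseWitness_ret_form_lines.2) ∧ ret_form_lines_alt (pvRaiseWitness_ret_form_lines.1) (pvRaiseWitness_ret_form_lines.2) = pvRaiseWitnessOut_ret_form_lines)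

-- ===== LEMMAS AND PROOFS =====

-- the common reference shape: first '*'-line at or after position j
def nstar (lines : List String) (j : Nat) : Nat :=
  if h : j < lines.length then
    (if PySem.Str.startswith lines[j] "*" then j else nstar lines (j + 1))
  else lines.length
termination_by lines.length - j

def begIdx (lines : List String) (header : String) : List Nat :=
  (List.range lines.length).filter (fun i => PySem.Str.startswith (lines.getD i "") header)

def secOf (lines : List String) (b : Nat) : List String :=
  (PySem.List.slice lines (some (b : Int)) (some ((nstar lines (b + 1) : Nat) : Int))).filter
    (fun l => !PySem.Str.startswith l "$")

theorem nstar_len (lines : List String) : nstar lines lines.length = lines.length := by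
  unfold nstar; simp

theorem com_cond (l : String) :
    (PySem.Str.startswith l "$" || PySem.Str.startswith l "$$" || PySem.Str.startswith l "$#")
      = PySem.Str.startswith l "$" := by
  cases hl : l.toList with
  | nil => simp [PySem.Str.startswith_eq, hl, PySem.Chars.startswith]
  | cons c t =>
    by_cases h : c = '$'
    · simp [PySem.Str.startswith_eq, hl, PySem.Chars.startswith, List.isPrefixOf, h]
    · have hb : ('$' == c) = false := by simp; exact fun he => h he.symm
      simp [PySem.Str.startswith_eq, hl, PySem.Chars.startswith, List.isPrefixOf, hb]

theorem remove_cons_self (t : List String) (h : String) :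
    PySem.List.remove? (h :: t) h = some t := by
  simp [PySem.List.remove?, List.idxOf?_cons]

theorem remove_cons_ne (t : List String) (h r : String) (hne : h ≠ r) :
    PySem.List.remove? (h :: t) r = (PySem.List.remove? t r).map (fun u => h :: u) := by
  simp [PySem.List.remove?, List.idxOf?_cons, hne]
  cases List.idxOf? r t <;> simp [List.eraseIdx]

theorem foldl_remove_cons (p : String → Bool) (h : String) (hp : p h = false) :
    ∀ (rs : List String), (∀ r ∈ rs, p r = true) → ∀ (t : List String),
      rs.foldl (fun a r => ((PySem.List.remove? a r).getD a)) (h :: t)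
        = h :: rs.foldl (fun a r => ((PySem.List.remove? a r).getD a)) t := by
  intro rs
  induction rs with
  | nil => intro _ t; simp
  | cons r rs' ih =>
    intro hmem t
    have hpr : p r = true := hmem r (by simp)
    have hne : h ≠ r := fun he => by rw [he, hpr] at hp; simp at hp
    have hstep : ((PySem.List.remove? (h :: t) r).getD (h :: t))
        = h :: ((PySem.List.remove? t r).getD t) := by
      rw [remove_cons_ne t h r hne]
      cases PySem.List.remove? t r <;> simp
    simp only [List.foldl_cons, hstep]
    exact ih (fun x hx => hmem x (by simp [hx])) _

theorem remove_filter (p : String → Bool) : ∀ (ls : List String),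
    (ls.filter p).foldl (fun a r => ((PySem.List.remove? a r).getD a)) ls
      = ls.filter (fun x => !p x) := by
  intro ls
  induction ls with
  | nil => simp
  | cons h t ih =>
    by_cases hp : p h = true
    · simp only [List.filter_cons, hp, if_pos, List.foldl_cons, remove_cons_self, Option.getD_some]
      simpa [List.filter_cons, hp] using ih
    · have hp' : p h = false := by simpa using hp
      rw [List.filter_cons_of_neg (by simp [hp'])]
      rw [foldl_remove_cons p h hp' _ (fun r hr => (List.mem_filter.mp hr).2) t]
      rw [ih, List.filter_cons_of_pos (by simp [hp'])]

theorem pvRemoveComment_eq (ls : List String) :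
    pvRemoveComment ls = ls.filter (fun l => !PySem.Str.startswith l "$") := by
  unfold pvRemoveComment
  simp only [com_cond]
  rw [PySem.List.foldl_append_if (fun l => PySem.Str.startswith l "$") (fun l => l) ls []]
  simp only [List.nil_append, List.map_id']
  exact remove_filter _ ls

theorem endScan_eq (lines : List String) (j : Nat) (hj : j < lines.length) :
    pvEndScan lines (PySem.List.pyRange ((j : Nat) : Int) (lines.length : Int) 1)
      = [((nstar lines j : Nat) : Int)] := by
  have key : ∀ (k j : Nat), lines.length - j ≤ k → j < lines.length →
      pvEndScan lines (PySem.List.pyRange ((j : Nat) : Int) (lines.length : Int) 1)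
        = [((nstar lines j : Nat) : Int)] := by
    intro k
    induction k with
    | zero => intro j hle hj; omega
    | succ k ih =>
      intro j hle hj
      rw [PySem.List.pyRange_one_cons (by exact_mod_cast hj)]
      unfold pvEndScan
      rw [PySem.List.pyGet?_natCast, List.getElem?_eq_getElem hj]
      unfold nstar
      rw [dif_pos hj]
      simp only [PySem.Str.startswith_eq]
      by_cases hs : PySem.Chars.startswith lines[j].toList "*".toList = true
      · rw [if_pos hs, if_pos hs]
      · rw [if_neg hs, if_neg hs]
        by_cases hlast : j + 1 = lines.length
        · rw [if_pos (by omega)]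
          have h2 : nstar lines (j + 1) = lines.length := by
            unfold nstar; rw [dif_neg (by omega)]
          rw [h2]
          congr 1
          omega
        · rw [if_neg (by omega)]
          have hc : ((j : Int) + 1) = (((j + 1 : Nat)) : Int) := by push_cast; ring
          rw [hc]
          exact ih (j + 1) (by omega) (by omega)
  exact key (lines.length - j) j (le_refl _) hj

theorem getElem?_eq_getD {α : Type} [Inhabited α] (l : List α) (i : Nat) (h : i < l.length) :
    l[i]? = some (l.getD i default) := by
  simp [List.getElem?_eq_getElem h, List.getD_eq_getElem?_getD]

theorem map_range_getD {α β : Type} [Inhabited α] (l : List α) (F : α → β) :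
    (List.range l.length).map (fun i => F (l.getD i default)) = l.map F := by
  apply List.ext_getElem
  · simp
  · intro i h1 h2
    simp only [List.getElem_map, List.getElem_range]
    rw [List.getD_eq_getElem l default (by simpa using h2)]

theorem begins_fold (lines : List String) (header : String) :
    ((PySem.List.pyRange 0 (lines.length : Int) 1).foldl (fun acc i =>
      match PySem.List.pyGet? lines i with
      | some line => if PySem.Str.startswith line header then acc ++ [i] else acc
      | none => acc) [])
      = (begIdx lines header).map (fun b => ((b : Nat) : Int)) := by
  rw [PySem.List.pyRange_zero_natCast, List.foldl_map]
  rw [PySem.List.foldl_congr_mem (List.range lines.length) _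
      (fun acc i => if PySem.Str.startswith (lines.getD i "") header
        then acc ++ [((i : Nat) : Int)] else acc) []
      (by
        intro acc i hi
        have hlt : i < lines.length := List.mem_range.mp hi
        rw [PySem.List.pyGet?_natCast, getElem?_eq_getD lines i hlt]
        rfl)]
  rw [PySem.List.foldl_append_if (fun i => PySem.Str.startswith (lines.getD i "") header)
      (fun i => ((i : Nat) : Int)) (List.range lines.length) []]
  rfl

theorem begins_eq (lines : List String) (header : String) :
    (pvBeginEnd lines header).1 = (begIdx lines header).map (fun b => ((b : Nat) : Int)) := by
  simp only [pvBeginEnd]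
  exact begins_fold lines header

theorem mem_begIdx (lines : List String) (header : String) (b : Nat) (hb : b ∈ begIdx lines header) :
    b < lines.length ∧ PySem.Str.startswith (lines.getD b "") header = true := by
  unfold begIdx at hb
  have := List.mem_filter.mp hb
  exact ⟨List.mem_range.mp this.1, this.2⟩

theorem pre_b_lt (lines : List String) (header : String) (hpre : Pre_ret_form_lines lines header)
    (b : Nat) (hb : b ∈ begIdx lines header) : b + 1 < lines.length := by
  obtain ⟨hlt, hsw⟩ := mem_begIdx lines header b hb
  by_contra hge
  have hb1 : b = lines.length - 1 := by omega
  unfold Pre_ret_form_lines at hpre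
  rw [List.getLast?_eq_getElem?] at hpre
  rw [List.getElem?_eq_getElem (by omega : lines.length - 1 < lines.length)] at hpre
  simp only [Option.all_some] at hpre
  rw [List.getD_eq_getElem lines "" hlt] at hsw
  have : lines[b] = lines[lines.length - 1] := by congr 1
  rw [this] at hsw
  rw [hsw] at hpre
  simp at hpre

theorem ends_eq (lines : List String) (header : String) (hpre : Pre_ret_form_lines lines header) :
    (pvBeginEnd lines header).2
      = (begIdx lines header).map (fun b => ((nstar lines (b + 1) : Nat) : Int)) := by
  simp only [pvBeginEnd]
  rw [begins_fold lines header, List.foldl_map]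
  rw [PySem.List.foldl_congr_mem (begIdx lines header) _
      (fun acc b => acc ++ [((nstar lines (b + 1) : Nat) : Int)]) []
      (by
        intro acc b hbm
        have hlt := pre_b_lt lines header hpre b hbm
        have hc : ((b : Int) + 1) = (((b + 1 : Nat)) : Int) := by push_cast; ring
        rw [hc, endScan_eq lines (b + 1) hlt])]
  rw [PySem.List.foldl_append_singleton_eq_map]
  rfl

theorem retA_eq (lines : List String) (header : String) (hpre : Pre_ret_form_lines lines header) :
    ret_form_lines lines header = (begIdx lines header).map (secOf lines) := by
  simp only [ret_form_lines]
  rw [begins_eq lines header, ends_eq lines header hpre]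
  rw [List.length_map]
  rw [PySem.List.pyRange_zero_natCast, List.foldl_map]
  rw [PySem.List.foldl_congr_mem (List.range (begIdx lines header).length) _
      (fun acc i => acc ++ [pvRemoveComment (PySem.List.slice lines
        (some (((begIdx lines header).getD i default : Nat) : Int))
        (some ((nstar lines ((begIdx lines header).getD i default + 1) : Nat) : Int)))]) []
      (by
        intro acc i hi
        have hlt : i < (begIdx lines header).length := List.mem_range.mp hi
        rw [PySem.List.pyGet?_natCast, PySem.List.pyGet?_natCast]
        rw [List.getElem?_map, List.getElem?_map, getElem?_eq_getD _ i hlt]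
        rfl)]
  rw [PySem.List.foldl_append_singleton_eq_map, List.nil_append]
  rw [map_range_getD (begIdx lines header)
      (fun b => pvRemoveComment (PySem.List.slice lines (some ((b : Nat) : Int))
        (some ((nstar lines (b + 1) : Nat) : Int))))]
  apply List.map_congr_left
  intro b _
  rw [pvRemoveComment_eq]
  rfl

def dsc (lines : List String) : Nat → List Int
  | 0 => []
  | k + 1 => ((nstar lines (k + 1) : Nat) : Int) :: dsc lines k

theorem alt_fold (lines : List String) : ∀ (k : Nat), k ≤ lines.length → ∀ (acc : List Int),
    ((PySem.List.pyRange ((k : Int) - 1) (-1) (-1)).foldl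
      (fun (st : List Int × Int) i =>
        let ns := st.1 ++ [st.2]
        match PySem.List.pyGet? lines i with
        | none => (ns, st.2)
        | some line => if PySem.Str.startswith line "*" then (ns, i) else (ns, st.2)) (acc, ((nstar lines k : Nat) : Int)))
      = (acc ++ dsc lines k, ((nstar lines 0 : Nat) : Int)) := by
  intro k
  induction k with
  | zero =>
    intro _ acc
    simp [dsc, PySem.List.pyRange]
  | succ k ih =>
    intro hk acc
    have hk' : k < lines.length := by omega
    have hc : ((((k : Nat) + 1 : Nat)) : Int) - 1 = ((k : Nat) : Int) := by push_cast; ring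
    rw [hc, PySem.List.pyRange_neg_one_cons (by omega)]
    rw [List.foldl_cons]
    have hget : PySem.List.pyGet? lines ((k : Nat) : Int) = some lines[k] := by
      rw [PySem.List.pyGet?_natCast, List.getElem?_eq_getElem hk']
    have hnk : nstar lines k = if PySem.Str.startswith lines[k] "*" then k else nstar lines (k + 1) := by
      conv_lhs => unfold nstar
      rw [dif_pos hk']
    have hstep : (let ns := (acc, ((nstar lines (k + 1) : Nat) : Int)).1
          ++ [(acc, ((nstar lines (k + 1) : Nat) : Int)).2]
        match PySem.List.pyGet? lines ((k : Nat) : Int) with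
        | none => (ns, (acc, ((nstar lines (k + 1) : Nat) : Int)).2)
        | some line => if PySem.Str.startswith line "*" then (ns, ((k : Nat) : Int))
            else (ns, (acc, ((nstar lines (k + 1) : Nat) : Int)).2))
        = (acc ++ [((nstar lines (k + 1) : Nat) : Int)], ((nstar lines k : Nat) : Int)) := by
      simp only [hget]
      by_cases hs : PySem.Str.startswith lines[k] "*" = true
      · rw [if_pos hs, hnk, if_pos hs]
      · rw [if_neg hs, hnk, if_neg hs]
    rw [hstep, ih (by omega) (acc ++ [((nstar lines (k + 1) : Nat) : Int)])]
    simp [dsc]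

theorem dsc_rev (lines : List String) : ∀ (k : Nat),
    (dsc lines k).reverse = (List.range k).map (fun i => ((nstar lines (i + 1) : Nat) : Int)) := by
  intro k
  induction k with
  | zero => simp [dsc]
  | succ k ih =>
    rw [List.range_succ, List.map_append]
    simp only [dsc, List.reverse_cons, ih, List.map_cons, List.map_nil]

theorem altNextStars_eq (lines : List String) :
    altNextStars lines
      = (List.range lines.length).map (fun i => ((nstar lines (i + 1) : Nat) : Int)) := by
  have h := alt_fold lines lines.length (le_refl _) []
  rw [nstar_len] at h
  show (List.foldl
      (fun (st : List Int × Int) i =>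
        let ns := st.1 ++ [st.2]
        match PySem.List.pyGet? lines i with
        | none => (ns, st.2)
        | some line => if PySem.Str.startswith line "*" then (ns, i) else (ns, st.2)) ([], ((lines.length : Nat) : Int))
      (PySem.List.pyRange (((lines.length : Nat) : Int) - 1) (-1) (-1))).1.reverse = _
  rw [h]
  simp only [List.nil_append]
  exact dsc_rev lines lines.length

theorem retB_eq (lines : List String) (header : String) :
    ret_form_lines_alt lines header = (begIdx lines header).map (secOf lines) := by
  unfold ret_form_lines_alt
  rw [altNextStars_eq lines]
  rw [PySem.List.pyRange_zero_natCast, List.foldl_map]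
  rw [PySem.List.foldl_congr_mem (List.range lines.length) _
      (fun acc i => if PySem.Str.startswith (lines.getD i "") header
        then acc ++ [secOf lines i] else acc) []
      (by
        intro acc i hi
        have hlt : i < lines.length := List.mem_range.mp hi
        have h2 : PySem.List.pyGet?
            ((List.range lines.length).map (fun i => ((nstar lines (i + 1) : Nat) : Int)))
            ((i : Nat) : Int) = some ((nstar lines (i + 1) : Nat) : Int) := by
          rw [PySem.List.pyGet?_natCast, List.getElem?_map,
            List.getElem?_eq_getElem (by simpa using hlt)]
          simp
        rw [h2, PySem.List.pyGet?_natCast, getElem?_eq_getD lines i hlt]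
        rfl)]
  rw [PySem.List.foldl_append_if (fun i => PySem.Str.startswith (lines.getD i "") header)
      (secOf lines) (List.range lines.length) []]
  rfl

-- ===== VERDICT (by name: the statement is the Claim_ definition above) =====
theorem ret_form_lines_spec : Claim_equal_ret_form_lines := by
  intro lines header _ hpre
  unfold Spec_ret_form_lines
  rw [retA_eq lines header hpre, retB_eq]

@[simp] theorem ret_form_lines_raises : Claim_raises_ret_form_lines := by
  unfold Claim_raises_ret_form_lines
  constructor
  · intro lines header _ hr hp
    unfold Raises_ret_form_lines at hr
    unfold Pre_ret_form_lines at hp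
    cases h : lines.getLast? with
    | none => rw [h] at hr; simp at hr
    | some l => rw [h] at hr hp; simp at hr hp; simp [hr] at hp
  · exact ⟨by decide, by decide, by decide⟩
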